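-- pv_equiv track=rewrite | github.com/Lecrut/Diffusion-code-generation | data/code/39_9_4.py | find_nested_substrings
-- ===== SOURCE A (Python) =====
-- def find_nested_substrings(phrase):
--     n = len(phrase)
--     substrings = set()
--     for i in range(n):
--         for j in range(i + 1, n + 1):
--             substrings.add(phrase[i:j])
--     result = list(substrings)
--     result.sort(key=lambda s: (len(s), s))
--     return result
-- ===== SOURCE B (Python) =====
-- def find_nested_substrings(phrase):
--     n = len(phrase)
--     result = []
--     for length in range(1, n + 1):
--         seen = set()
--         for i in range(n - length + 1):
--             seen.add(phrase[i:i + length])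
--         result.extend(sorted(seen))
--     return result
-- ===== Notes on version B (the rewrite author's own statement) =====
-- stated objective: alternative
-- what changed: B enumerates substrings length-major, dedups and lexicographically sorts each length group separately and concatenates the groups, instead of A's one global set sorted once with a (len, s) tuple key.
import Mathlib
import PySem

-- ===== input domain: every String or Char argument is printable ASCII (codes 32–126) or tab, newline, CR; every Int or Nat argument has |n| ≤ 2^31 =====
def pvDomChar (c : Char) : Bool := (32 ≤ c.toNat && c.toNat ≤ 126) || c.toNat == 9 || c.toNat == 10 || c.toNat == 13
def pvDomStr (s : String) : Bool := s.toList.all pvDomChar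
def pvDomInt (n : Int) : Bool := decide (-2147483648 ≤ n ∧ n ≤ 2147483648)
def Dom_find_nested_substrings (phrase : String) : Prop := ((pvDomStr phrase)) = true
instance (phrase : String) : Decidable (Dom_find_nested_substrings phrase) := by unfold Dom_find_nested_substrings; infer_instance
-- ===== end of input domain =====

-- B enumerates substrings length-major (per-length set + plain lexicographic sort of each group,
-- groups concatenated) instead of A's single global set sorted once with a (len, s) tuple key.


-- ===== PORT A =====
def find_nested_substrings (phrase : String) : List String :=
  let n := PySem.Str.len phrase
  let substrings : PySem.Set String :=
    (PySem.List.pyRange 0 n).foldl (fun acc i =>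
      (PySem.List.pyRange (i + 1) (n + 1)).foldl (fun acc2 j =>
        acc2.add (PySem.Str.slice phrase (some i) (some j))) acc)
      PySem.Set.empty
  PySem.List.sorted2 substrings (fun s => PySem.Str.len s) (fun s => s)

-- ===== PORT B =====
def find_nested_substrings_alt (phrase : String) : List String :=
  let n := PySem.Str.len phrase
  (PySem.List.pyRange 1 (n + 1)).foldl (fun result len =>
    let seen : PySem.Set String :=
      (PySem.List.pyRange 0 (n - len + 1)).foldl (fun s i =>
        s.add (PySem.Str.slice phrase (some i) (some (i + len)))) PySem.Set.empty
    result ++ PySem.List.sorted seen (fun x => x)) []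

-- ===== PRECONDITION & SPEC =====
def Spec_find_nested_substrings (phrase : String) (out : List String) : Prop := out = find_nested_substrings_alt phrase
instance (phrase : String) (out : List String) : Decidable (Spec_find_nested_substrings phrase out) := by unfold Spec_find_nested_substrings; infer_instance

-- ===== CLAIM (what is proved, stated in full; the proofs are below) =====
def Claim_equal_find_nested_substrings : Prop := ∀ (phrase : String), Dom_find_nested_substrings phrase → Spec_find_nested_substrings phrase (find_nested_substrings phrase)

-- ===== LEMMAS AND PROOFS =====

-- the strict lexicographic order on the (k1, k2) key pair
def pvPlt {α κ₁ κ₂ : Type} [LinearOrder κ₁] [LinearOrder κ₂] (k1 : α → κ₁) (k2 : α → κ₂) (a b : α) : Prop :=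
  k1 a < k1 b ∨ (k1 a = k1 b ∧ k2 a < k2 b)

-- the Bool comparator used inside PySem.List.sorted2 (reverse = false)
def pvBefore {α κ₁ κ₂ : Type} [LinearOrder κ₁] [LinearOrder κ₂] (k1 : α → κ₁) (k2 : α → κ₂) (a b : α) : Bool :=
  decide (k1 a < k1 b) || (!decide (k1 b < k1 a) && decide (k2 a < k2 b))

theorem pvBefore_iff {α κ₁ κ₂ : Type} [LinearOrder κ₁] [LinearOrder κ₂] (k1 : α → κ₁) (k2 : α → κ₂) (a b : α) :
    pvBefore k1 k2 a b = true ↔ pvPlt k1 k2 a b := by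
  simp only [pvBefore, pvPlt, Bool.or_eq_true, Bool.and_eq_true, Bool.not_eq_eq_eq_not,
    Bool.not_true, decide_eq_true_eq, decide_eq_false_iff_not, not_lt]
  constructor
  · rintro (h | ⟨h1, h2⟩)
    · exact Or.inl h
    · rcases eq_or_lt_of_le h1 with h | h
      · exact Or.inr ⟨h, h2⟩
      · exact Or.inl h
  · rintro (h | ⟨h1, h2⟩)
    · exact Or.inl h
    · exact Or.inr ⟨h1.le, h2⟩

theorem pvPlt_asymm {α κ₁ κ₂ : Type} [LinearOrder κ₁] [LinearOrder κ₂] {k1 : α → κ₁} {k2 : α → κ₂} {a b : α}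
    (h : pvPlt k1 k2 a b) : ¬ pvPlt k1 k2 b a := by
  rcases h with h | ⟨h1, h2⟩
  · rintro (g | ⟨g1, g2⟩)
    · exact lt_asymm h g
    · exact absurd h (g1 ▸ lt_irrefl _)
  · rintro (g | ⟨g1, g2⟩)
    · exact absurd g (h1 ▸ lt_irrefl _)
    · exact lt_asymm h2 g2

theorem pvPlt_neg_trans {α κ₁ κ₂ : Type} [LinearOrder κ₁] [LinearOrder κ₂] {k1 : α → κ₁} {k2 : α → κ₂} {a b c : α}
    (hab : ¬ pvPlt k1 k2 a b) (hbc : ¬ pvPlt k1 k2 b c) : ¬ pvPlt k1 k2 a c := by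
  simp only [pvPlt, not_or, not_and, not_lt] at *
  obtain ⟨h1, h2⟩ := hab
  obtain ⟨g1, g2⟩ := hbc
  refine ⟨le_trans g1 h1, fun hac => ?_⟩
  have e1 : k1 a = k1 b := le_antisymm (by rw [hac]; exact g1) h1
  have e2 : k1 b = k1 c := by rw [← e1, hac]
  exact le_trans (g2 e2) (h2 e1)

theorem pvBefore_false_iff {α κ₁ κ₂ : Type} [LinearOrder κ₁] [LinearOrder κ₂] (k1 : α → κ₁) (k2 : α → κ₂) (a b : α) :
    pvBefore k1 k2 a b = false ↔ ¬ pvPlt k1 k2 a b := by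
  rw [← pvBefore_iff k1 k2 a b]; cases pvBefore k1 k2 a b <;> simp

-- insertBy with the lexicographic comparator preserves the weak pairwise invariant
theorem insertBy_pvBefore_pairwise {α κ₁ κ₂ : Type} [LinearOrder κ₁] [LinearOrder κ₂] (k1 : α → κ₁) (k2 : α → κ₂)
    (x : α) (ys : List α) (h : ys.Pairwise (fun a b => pvBefore k1 k2 b a = false)) :
    (PySem.List.insertBy (pvBefore k1 k2) x ys).Pairwise (fun a b => pvBefore k1 k2 b a = false) := by
  induction ys with
  | nil => simp [PySem.List.insertBy]
  | cons y ys ih =>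
    rw [List.pairwise_cons] at h
    obtain ⟨hy, hys⟩ := h
    by_cases hxy : pvBefore k1 k2 x y = true
    · rw [show PySem.List.insertBy (pvBefore k1 k2) x (y :: ys) = x :: y :: ys by
        simp [PySem.List.insertBy, hxy]]
      refine List.pairwise_cons.mpr ⟨?_, List.pairwise_cons.mpr ⟨hy, hys⟩⟩
      intro z hz
      rcases List.mem_cons.mp hz with rfl | hz'
      · rw [pvBefore_false_iff]
        exact pvPlt_asymm ((pvBefore_iff k1 k2 x z).mp hxy)
      · rw [pvBefore_false_iff]
        exact pvPlt_neg_trans ((pvBefore_false_iff k1 k2 z y).mp (hy z hz'))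
          (pvPlt_asymm ((pvBefore_iff k1 k2 x y).mp hxy))
    · rw [Bool.not_eq_true] at hxy
      rw [show PySem.List.insertBy (pvBefore k1 k2) x (y :: ys)
            = y :: PySem.List.insertBy (pvBefore k1 k2) x ys by
        simp [PySem.List.insertBy, hxy]]
      refine List.pairwise_cons.mpr ⟨?_, ih hys⟩
      intro z hz
      rcases (PySem.List.insertBy_mem_iff (pvBefore k1 k2) x z ys).mp hz with rfl | hz
      · exact hxy
      · exact hy z hz

theorem foldl_insertBy_pairwise {α κ₁ κ₂ : Type} [LinearOrder κ₁] [LinearOrder κ₂] (k1 : α → κ₁) (k2 : α → κ₂)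
    (xs acc : List α) (h : acc.Pairwise (fun a b => pvBefore k1 k2 b a = false)) :
    (xs.foldl (fun acc x => PySem.List.insertBy (pvBefore k1 k2) x acc) acc).Pairwise
      (fun a b => pvBefore k1 k2 b a = false) := by
  induction xs generalizing acc with
  | nil => exact h
  | cons x xs ih => exact ih _ (insertBy_pvBefore_pairwise k1 k2 x acc h)

theorem sorted2_eq_before : ∀ {α κ₁ κ₂ : Type} [LinearOrder κ₁] [LinearOrder κ₂] (xs : List α)
    (k1 : α → κ₁) (k2 : α → κ₂),
    PySem.List.sorted2 xs k1 k2 = xs.foldl (fun acc x => PySem.List.insertBy (pvBefore k1 k2) x acc) [] := by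
  intro α κ₁ κ₂ _ _ xs k1 k2
  rfl

-- UNIQUENESS: any strictly lex-increasing rearrangement of xs is sorted2 xs k1 k2
theorem sorted2_eq_of_perm_of_pairwise_plt {α κ₁ κ₂ : Type} [LinearOrder κ₁] [LinearOrder κ₂]
    (xs ys : List α) (k1 : α → κ₁) (k2 : α → κ₂)
    (hperm : ys.Perm xs) (hp : ys.Pairwise (pvPlt k1 k2)) :
    PySem.List.sorted2 xs k1 k2 = ys := by
  have hkeq : ∀ a ∈ ys, ∀ b ∈ ys, ¬ pvPlt k1 k2 a b → ¬ pvPlt k1 k2 b a → a = b := by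
    intro a ha b hb h1 h2
    by_contra hne
    have := List.Pairwise.forall (R := fun a b => pvPlt k1 k2 a b ∨ pvPlt k1 k2 b a)
      (fun _ _ h => h.symm) (hp.imp Or.inl) ha hb hne
    tauto
  refine List.Perm.eq_of_pairwise (le := fun a b => pvBefore k1 k2 b a = false) ?_ ?_ ?_ ?_
  · intro a b ha hb h1 h2
    have ha' : a ∈ ys := hperm.mem_iff.mpr (((PySem.List.sorted2_perm xs k1 k2 false).mem_iff).mp ha)
    exact hkeq a ha' b hb ((pvBefore_false_iff k1 k2 a b).mp h2) ((pvBefore_false_iff k1 k2 b a).mp h1)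
  · rw [sorted2_eq_before]
    exact foldl_insertBy_pairwise k1 k2 xs [] (by simp)
  · exact hp.imp (fun h => (pvBefore_false_iff _ _ _ _).mpr (pvPlt_asymm h))
  · exact (PySem.List.sorted2_perm xs k1 k2 false).trans hperm.symm

-- nested set-building loops = Set.ofList of the flatMap of all generated elements
theorem foldl_foldl_add {α ι₁ ι₂ : Type} [BEq α] (l : List ι₁) (m : ι₁ → List ι₂) (f : ι₁ → ι₂ → α)
    (acc : PySem.Set α) :
    l.foldl (fun a i => (m i).foldl (fun a2 j => a2.add (f i j)) a) acc
      = (l.flatMap (fun i => (m i).map (f i))).foldl PySem.Set.add acc := by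
  induction l generalizing acc with
  | nil => rfl
  | cons x l ih =>
    rw [List.foldl_cons, List.flatMap_cons, List.foldl_append, ih, List.foldl_map]

theorem foldl_add_eq_ofList {α ι : Type} [BEq α] (l : List ι) (f : ι → α) :
    l.foldl (fun s i => s.add (f i)) PySem.Set.empty = PySem.Set.ofList (l.map f) := by
  rw [PySem.Set.ofList, List.foldl_map]

-- length of a length-len slice
theorem len_slice_of_bounds (phrase : String) (i L : Int) (h0 : 0 ≤ i) (hL : 0 ≤ L)
    (hn : i + L ≤ (phrase.toList.length : Int)) :
    PySem.Str.len (PySem.Str.slice phrase (some i) (some (i + L))) = L := by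
  rw [PySem.Str.len_eq, PySem.Str.toList_slice]
  show ((PySem.List.slice phrase.toList (some i) (some (i + L))).length : Int) = L
  rw [PySem.List.slice_toNat _ h0 (by omega)]
  rw [List.length_take, List.length_drop]
  omega

-- A's set = Set.ofList of all (i, j)-slices
def pvAllSubs (phrase : String) : List String :=
  (PySem.List.pyRange 0 (PySem.Str.len phrase)).flatMap (fun i =>
    (PySem.List.pyRange (i + 1) (PySem.Str.len phrase + 1)).map
      (fun j => PySem.Str.slice phrase (some i) (some j)))

-- B's per-length window list
def pvWins (phrase : String) (L : Int) : List String :=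
  (PySem.List.pyRange 0 (PySem.Str.len phrase - L + 1)).map
    (fun i => PySem.Str.slice phrase (some i) (some (i + L)))

theorem mem_pvAllSubs (phrase : String) (y : String) :
    y ∈ pvAllSubs phrase ↔ ∃ i j : Int, 0 ≤ i ∧ i < j ∧ j ≤ PySem.Str.len phrase ∧
      y = PySem.Str.slice phrase (some i) (some j) := by
  simp only [pvAllSubs, List.mem_flatMap, List.mem_map, PySem.List.mem_pyRange_one]
  constructor
  · rintro ⟨i, ⟨hi0, hin⟩, j, ⟨hj1, hj2⟩, rfl⟩
    exact ⟨i, j, hi0, by omega, by omega, rfl⟩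
  · rintro ⟨i, j, hi0, hij, hjn, rfl⟩
    exact ⟨i, ⟨hi0, by omega⟩, j, ⟨by omega, by omega⟩, rfl⟩

theorem mem_pvWins (phrase : String) (L : Int) (y : String) :
    y ∈ pvWins phrase L ↔ ∃ i : Int, 0 ≤ i ∧ i + L ≤ PySem.Str.len phrase ∧
      y = PySem.Str.slice phrase (some i) (some (i + L)) := by
  simp only [pvWins, List.mem_map, PySem.List.mem_pyRange_one]
  constructor
  · rintro ⟨i, ⟨hi0, hin⟩, rfl⟩
    exact ⟨i, hi0, by omega, rfl⟩
  · rintro ⟨i, hi0, hin, rfl⟩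
    exact ⟨i, ⟨hi0, by omega⟩, rfl⟩

-- B as a flatMap of per-length sorted blocks
theorem alt_eq_flatMap (phrase : String) :
    find_nested_substrings_alt phrase
      = (PySem.List.pyRange 1 (PySem.Str.len phrase + 1)).flatMap (fun L =>
          PySem.List.sorted (PySem.Set.ofList (pvWins phrase L)) (fun x => x)) := by
  show (PySem.List.pyRange 1 (PySem.Str.len phrase + 1)).foldl _ [] = _
  rw [PySem.List.foldl_congr_mem _ _
    (fun result len => result ++ PySem.List.sorted (PySem.Set.ofList (pvWins phrase len)) (fun x => x)) _
    (by
      intro acc len _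
      show acc ++ PySem.List.sorted
        ((PySem.List.pyRange 0 (PySem.Str.len phrase - len + 1)).foldl (fun s i =>
          PySem.Set.add s (PySem.Str.slice phrase (some i) (some (i + len)))) PySem.Set.empty)
        (fun x => x) = _
      rw [foldl_add_eq_ofList]
      rfl)]
  rw [PySem.List.foldl_append_eq_flatMap]
  rfl

theorem a_eq_sorted2 (phrase : String) :
    find_nested_substrings phrase
      = PySem.List.sorted2 (PySem.Set.ofList (pvAllSubs phrase)) (fun s => PySem.Str.len s) (fun s => s) := by
  show PySem.List.sorted2 ((PySem.List.pyRange 0 (PySem.Str.len phrase)).foldl _ PySem.Set.empty) _ _ = _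
  rw [foldl_foldl_add]
  rfl

-- every element of a length-L block has length L, and the block is strictly <-increasing
theorem block_mem_len (phrase : String) (L : Int) (hL : 0 ≤ L) (y : String)
    (hy : y ∈ PySem.List.sorted (PySem.Set.ofList (pvWins phrase L)) (fun x => x)) :
    PySem.Str.len y = L := by
  rw [PySem.List.mem_sorted, PySem.Set.mem_ofList, mem_pvWins] at hy
  obtain ⟨i, hi0, hin, rfl⟩ := hy
  exact len_slice_of_bounds phrase i L hi0 hL (by rw [← PySem.Str.len_eq]; omega)

theorem flatMap_pairwise (phrase : String) :
    ((PySem.List.pyRange 1 (PySem.Str.len phrase + 1)).flatMap (fun L =>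
        PySem.List.sorted (PySem.Set.ofList (pvWins phrase L)) (fun x => x))).Pairwise
      (pvPlt (fun s => PySem.Str.len s) (fun s : String => s)) := by
  rw [List.pairwise_flatMap]
  constructor
  · intro L hL
    rw [PySem.List.mem_pyRange_one] at hL
    refine List.Pairwise.imp_of_mem ?_ (PySem.List.sorted_ofList_pairwise_lt (pvWins phrase L))
    intro a b ha hb hab
    refine Or.inr ⟨?_, hab⟩
    show PySem.Str.len a = PySem.Str.len b
    rw [block_mem_len phrase L (by omega) a ha, block_mem_len phrase L (by omega) b hb]
  · refine List.Pairwise.imp_of_mem ?_ (PySem.List.pairwise_lt_pyRange_one 1 (PySem.Str.len phrase + 1))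
    intro L1 L2 hL1 hL2 hlt x hx y hy
    rw [PySem.List.mem_pyRange_one] at hL1 hL2
    refine Or.inl ?_
    show PySem.Str.len x < PySem.Str.len y
    rw [block_mem_len phrase L1 (by omega) x hx, block_mem_len phrase L2 (by omega) y hy]
    exact hlt

theorem flatMap_perm (phrase : String) :
    ((PySem.List.pyRange 1 (PySem.Str.len phrase + 1)).flatMap (fun L =>
        PySem.List.sorted (PySem.Set.ofList (pvWins phrase L)) (fun x => x))).Perm
      (PySem.Set.ofList (pvAllSubs phrase)) := by
  rw [List.perm_ext_iff_of_nodup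
      ((flatMap_pairwise phrase).imp (fun {a b} h => by
        intro hab
        subst hab
        exact pvPlt_asymm h h))
      (PySem.Set.nodup_ofList _)]
  intro y
  rw [PySem.Set.mem_ofList, mem_pvAllSubs, List.mem_flatMap]
  constructor
  · rintro ⟨L, hL, hy⟩
    rw [PySem.List.mem_pyRange_one] at hL
    rw [PySem.List.mem_sorted, PySem.Set.mem_ofList, mem_pvWins] at hy
    obtain ⟨i, hi0, hin, rfl⟩ := hy
    exact ⟨i, i + L, hi0, by omega, by omega, rfl⟩
  · rintro ⟨i, j, hi0, hij, hjn, rfl⟩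
    refine ⟨j - i, ?_, ?_⟩
    · rw [PySem.List.mem_pyRange_one]
      have h0 : (0 : Int) ≤ PySem.Str.len phrase := by rw [PySem.Str.len_eq]; positivity
      omega
    · rw [PySem.List.mem_sorted, PySem.Set.mem_ofList, mem_pvWins]
      exact ⟨i, hi0, by omega, by rw [show i + (j - i) = j by ring]⟩

-- ===== VERDICT (by name: the statement is the Claim_ definition above) =====
theorem find_nested_substrings_spec : Claim_equal_find_nested_substrings := by
  intro phrase _
  show find_nested_substrings phrase = find_nested_substrings_alt phrase
  rw [a_eq_sorted2, alt_eq_flatMap]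
  exact sorted2_eq_of_perm_of_pairwise_plt _ _ _ _ (flatMap_perm phrase) (flatMap_pairwise phrase)
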